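-- pv_equiv track=rewrite | github.com/kkr010128/codebert | problem152/problem152_96.py | count
-- ===== SOURCE A (Python) =====
-- def count(s):
--     m=0
--     e=0
--     for t in s:
--         if t=='(':
--             e+=1
--         else:
--             e-=1
--             m=min(m,e)
--     return (e,m)
-- ===== SOURCE B (Python) =====
-- def count(s):
--     # Divide and conquer: (balance, min-prefix) forms a monoid under
--     # (e1, m1) * (e2, m2) = (e1 + e2, min(m1, e1 + m2)); recurse on halves.
--     if len(s) <= 1:
--         if not s:
--             return (0, 0)
--         return (1, 0) if s == '(' else (-1, -1)
--     h = len(s) // 2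
--     e1, m1 = count(s[:h])
--     e2, m2 = count(s[h:])
--     return (e1 + e2, min(m1, e1 + m2))
-- ===== Notes on version B (the rewrite author's own statement) =====
-- stated objective: alternative
-- what changed: Replaces A's single left-to-right scan with a divide-and-conquer recursion: the string is split in half, each half is reduced to its (balance, min-prefix) summary, and the two summaries are combined with the monoid rule (e1+e2, min(m1, e1+m2)).
import Mathlib
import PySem

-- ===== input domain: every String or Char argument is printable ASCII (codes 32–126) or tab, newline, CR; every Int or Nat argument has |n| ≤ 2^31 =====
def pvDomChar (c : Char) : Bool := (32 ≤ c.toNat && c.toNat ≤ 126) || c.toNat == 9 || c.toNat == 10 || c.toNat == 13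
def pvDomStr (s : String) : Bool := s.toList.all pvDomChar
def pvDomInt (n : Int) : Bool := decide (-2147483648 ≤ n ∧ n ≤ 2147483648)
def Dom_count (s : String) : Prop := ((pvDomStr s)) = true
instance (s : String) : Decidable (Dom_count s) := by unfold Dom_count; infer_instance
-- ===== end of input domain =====

-- B replaces A's single fused scan with a divide-and-conquer recursion on string halves
-- using the monoid combine (e1+e2, min(m1, e1+m2)) (objective: alternative; no speed claim).

-- ===== PORT A =====
-- A's loop over the characters with state (m, e); branch order as in the source.
def countLoop (cs : List Char) (m e : Int) : Int × Int :=
  match cs with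
  | [] => (m, e)
  | t :: rest =>
      if t = '(' then countLoop rest m (e + 1)
      else countLoop rest (min m (e - 1)) (e - 1)

def count (s : String) : Int × Int :=
  let (m, e) := countLoop s.toList 0 0
  (e, m)

-- ===== PORT B =====
-- Source B's recursion: base cases for len ≤ 1, else split at len//2 and combine.
-- s[:h] / s[h:] with 0 ≤ h ≤ len s are exactly List.take h / List.drop h.
def countDC (cs : List Char) : Int × Int :=
  match cs with
  | [] => (0, 0)
  | [c] => if c = '(' then ((1 : Int), (0 : Int)) else (-1, -1)
  | a :: b :: rest =>
      let cs' := a :: b :: rest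
      let h := cs'.length / 2
      let p := countDC (cs'.take h)
      let q := countDC (cs'.drop h)
      (p.1 + q.1, min p.2 (p.1 + q.2))
termination_by cs.length
decreasing_by
  · simp only [List.length_take, List.length_cons]
    omega
  · simp only [List.length_drop, List.length_cons]
    omega

def count_alt (s : String) : Int × Int := countDC s.toList

-- ===== PRECONDITION & SPEC =====
def Spec_count (s : String) (out : Int × Int) : Prop := out = count_alt s
instance (s : String) (out : Int × Int) : Decidable (Spec_count s out) := by unfold Spec_count; infer_instance

-- ===== CLAIM (what is proved, stated in full; the proofs are below) =====
def Claim_equal_count : Prop := ∀ (s : String), Dom_count s → Spec_count s (count s)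

-- ===== LEMMAS AND PROOFS =====

-- Per-character delta, total balance E, and min-prefix (with 0 baseline) M.
def pvDelta (c : Char) : Int := if c = '(' then 1 else -1

def pvE (cs : List Char) : Int :=
  match cs with
  | [] => 0
  | c :: rest => pvDelta c + pvE rest

def pvM (cs : List Char) : Int :=
  match cs with
  | [] => 0
  | c :: rest => min 0 (pvDelta c + pvM rest)

theorem pvM_nonpos (cs : List Char) : pvM cs ≤ 0 := by
  cases cs with
  | nil => simp [pvM]
  | cons c rest => simp [pvM]

theorem pvE_append (u v : List Char) : pvE (u ++ v) = pvE u + pvE v := by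
  induction u with
  | nil => simp [pvE]
  | cons c rest ih => simp [pvE, ih]; ring

theorem pvM_append (u v : List Char) : pvM (u ++ v) = min (pvM u) (pvE u + pvM v) := by
  induction u with
  | nil => have := pvM_nonpos v; simp [pvM, pvE]; omega
  | cons c rest ih =>
      simp only [List.cons_append, pvM, pvE, ih]
      have := pvM_nonpos v
      omega

-- A's loop computes (min m (e + M), e + E) under the invariant m ≤ e.
theorem countLoop_eq (cs : List Char) :
    ∀ (m e : Int), m ≤ e →
      countLoop cs m e = (min m (e + pvM cs), e + pvE cs) := by
  induction cs with
  | nil => intro m e h; simp [countLoop, pvM, pvE]; omega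
  | cons c rest ih =>
      intro m e h
      by_cases hc : c = '('
      · rw [countLoop, if_pos hc, ih m (e + 1) (by omega)]
        simp only [pvM, pvE, pvDelta, if_pos hc, Prod.mk.injEq]
        have := pvM_nonpos rest
        constructor <;> omega
      · rw [countLoop, if_neg hc, ih (min m (e - 1)) (e - 1) (min_le_right _ _)]
        simp only [pvM, pvE, pvDelta, if_neg hc, Prod.mk.injEq]
        have := pvM_nonpos rest
        constructor <;> omega

-- B's divide and conquer computes (E, M).
theorem countDC_eq (cs : List Char) : countDC cs = (pvE cs, pvM cs) := by
  induction cs using countDC.induct with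
  | case1 => simp [countDC, pvE, pvM]
  | case2 => simp [countDC, pvE, pvM, pvDelta]
  | case3 c hc => simp [countDC, pvE, pvM, pvDelta, hc]
  | case4 a b rest cs' hh ih2 ih1 =>
      have hcs : cs' = a :: b :: rest := rfl
      have hhh : hh = (a :: b :: rest).length / 2 := rfl
      rw [hcs, hhh] at ih1 ih2
      rw [countDC]
      simp only [ih1, ih2]
      have hE := pvE_append ((a :: b :: rest).take ((a :: b :: rest).length / 2))
                  ((a :: b :: rest).drop ((a :: b :: rest).length / 2))
      have hM := pvM_append ((a :: b :: rest).take ((a :: b :: rest).length / 2))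
                  ((a :: b :: rest).drop ((a :: b :: rest).length / 2))
      rw [List.take_append_drop] at hE hM
      exact Prod.ext (by simpa using hE.symm) (by simpa using hM.symm)

-- ===== VERDICT (by name: the statement is the Claim_ definition above) =====
theorem count_spec : Claim_equal_count := by
  intro s _
  unfold Spec_count count count_alt
  rw [countLoop_eq s.toList 0 0 le_rfl, countDC_eq]
  have := pvM_nonpos s.toList
  simp only [Prod.mk.injEq]
  constructor <;> omega
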